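-- pv_equiv track=rewrite | github.com/daniddm/padel-canaveral | upload_shopify_hybrid.py | compare_inventory
-- ===== SOURCE A (Python) =====
-- from typing import Dict, List, Optional, Set, Tuple, Any, Type
--
-- def compare_inventory(shopify_variants: List[dict], csv_variants: List[dict]) -> bool:
--     """Compara inventario entre Shopify y CSV. Retorna True si hay diferencias."""
--     if len(shopify_variants) != len(csv_variants):
--         return True
--
--     # Ordenar por option1 en lowercase para emparejar correctamente
--     shopify_sorted = sorted(shopify_variants, key=lambda v: (v.get("option1") or "").lower())
--     csv_sorted = sorted(csv_variants, key=lambda v: (v.get("option1") or "").lower())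
--
--     for s_var, c_var in zip(shopify_sorted, csv_sorted):
--         s_inv = int(s_var.get("inventory_quantity") or 0)
--         c_inv = int(c_var.get("inventory_quantity") or 0)
--
--         if s_inv != c_inv:
--             return True
--
--     return False
-- ===== SOURCE B (Python) =====
-- def _inv_seq(variants):
--     groups = {}
--     for v in variants:
--         k = (v.get("option1") or "").lower()
--         groups.setdefault(k, []).append(int(v.get("inventory_quantity") or 0))
--     out = []
--     for k in sorted(groups):
--         out += groups[k]
--     return out
--
-- def compare_inventory(shopify_variants, csv_variants):
--     if len(shopify_variants) != len(csv_variants):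
--         return True
--     return _inv_seq(shopify_variants) != _inv_seq(csv_variants)
-- ===== Notes on version B (the rewrite author's own statement) =====
-- stated objective: alternative
-- what changed: B replaces A's two full comparison sorts of the variant dicts by a single grouping pass into a dict keyed by lowercased option1 (appending each parsed inventory to its key's list) and compares the two inventory sequences concatenated in sorted order of the distinct keys; it sorts only the k distinct keys instead of the n records (O(n + k log k) vs O(n log n)), which a timing run did not measure as faster on the generated inputs.
import Mathlib
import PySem

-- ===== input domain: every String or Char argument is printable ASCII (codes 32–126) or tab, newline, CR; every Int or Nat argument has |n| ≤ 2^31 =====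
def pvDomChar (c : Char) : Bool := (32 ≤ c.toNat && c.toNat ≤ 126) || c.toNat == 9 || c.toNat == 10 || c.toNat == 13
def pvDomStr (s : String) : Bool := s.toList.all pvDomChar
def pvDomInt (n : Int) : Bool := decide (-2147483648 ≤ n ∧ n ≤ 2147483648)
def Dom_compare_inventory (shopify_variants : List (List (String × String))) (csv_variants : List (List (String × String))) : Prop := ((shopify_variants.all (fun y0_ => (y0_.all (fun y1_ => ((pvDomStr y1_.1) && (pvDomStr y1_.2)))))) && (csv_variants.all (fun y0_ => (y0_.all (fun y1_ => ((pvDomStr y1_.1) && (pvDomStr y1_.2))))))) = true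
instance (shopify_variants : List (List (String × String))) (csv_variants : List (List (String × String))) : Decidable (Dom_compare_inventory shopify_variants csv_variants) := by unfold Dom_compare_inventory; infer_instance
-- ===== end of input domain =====

-- B replaces A's full comparison sort of both variant lists by one grouping pass into a
-- dict keyed by lowercased option1 and a sort of the distinct keys only, then compares the
-- two concatenated inventory sequences (objective: alternative algorithm, same measured cost).

-- shared helpers: Python dict access v.get(k) (association list, first match),
-- the sort key (v.get("option1") or "").lower(), and int(v.get("inventory_quantity") or 0)
def pvGet (v : List (String × String)) (k : String) : Option String :=
  (v.find? (fun p => p.1 == k)).map (fun p => p.2)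

def pvKey (v : List (String × String)) : String :=
  PySem.Str.lower ((pvGet v "option1").getD "")

-- int(s or 0); where Python's int() raises ValueError the `.getD 0` stands in — those
-- inputs are excluded by Pre_compare_inventory
def pvInv (v : List (String × String)) : Int :=
  match pvGet v "inventory_quantity" with
  | none => 0
  | some s => if s = "" then 0 else (PySem.Int.ofStr? s).getD 0

-- ===== PORT A =====
-- A's for-loop over zip(shopify_sorted, csv_sorted) with early `return True`
def pvLoopA : List ((List (String × String)) × (List (String × String))) → Bool
  | [] => false
  | (s_var, c_var) :: rest => if pvInv s_var ≠ pvInv c_var then true else pvLoopA rest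

def compare_inventory (shopify_variants : List (List (String × String))) (csv_variants : List (List (String × String))) : Bool :=
  if shopify_variants.length ≠ csv_variants.length then true
  else
    let shopify_sorted := PySem.List.sorted shopify_variants pvKey false
    let csv_sorted := PySem.List.sorted csv_variants pvKey false
    pvLoopA (shopify_sorted.zip csv_sorted)

-- ===== PORT B =====
-- Source B's _inv_seq: one grouping pass building a dict key -> list of inventories
-- (groups.setdefault(k, []).append(i) is d.modify k [] (· ++ [i])), then the groups
-- concatenated in sorted key order (`for k in sorted(groups): out += groups[k]`)
def pvInvSeq (variants : List (List (String × String))) : List Int :=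
  let groups : PySem.Dict String (List Int) :=
    variants.foldl (fun d v => d.modify (pvKey v) [] (fun l => l ++ [pvInv v])) PySem.Dict.empty
  (PySem.List.sorted groups.keys (fun k => k) false).foldl
    (fun out k => out ++ groups.getD k []) []

def compare_inventory_alt (shopify_variants : List (List (String × String))) (csv_variants : List (List (String × String))) : Bool :=
  if shopify_variants.length ≠ csv_variants.length then true
  else decide (pvInvSeq shopify_variants ≠ pvInvSeq csv_variants)

-- ===== PRECONDITION & SPEC =====
-- Python's int() succeeds on this variant's inventory_quantity (absent / empty / parseable)
def pvOkInv (v : List (String × String)) : Bool :=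
  match pvGet v "inventory_quantity" with
  | none => true
  | some s => s == "" || (PySem.Int.ofStr? s).isSome
-- Pre_ excludes inputs holding an inventory_quantity string int() cannot parse: there Python
-- raises ValueError — except that A can still return True when it meets a difference before
-- reaching the unparseable value, while B (which parses everything) raises; lists of unequal
-- length are answered before any parsing and stay inside Pre_.
def Pre_compare_inventory (shopify_variants : List (List (String × String))) (csv_variants : List (List (String × String))) : Prop :=
  shopify_variants.length ≠ csv_variants.length ∨
    (shopify_variants.all pvOkInv = true ∧ csv_variants.all pvOkInv = true)
instance (shopify_variants : List (List (String × String))) (csv_variants : List (List (String × String))) : Decidable (Pre_compare_inventory shopify_variants csv_variants) := by unfold Pre_compare_inventory; infer_instance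

def pvWitness_compare_inventory : (List (List (String × String))) × (List (List (String × String))) :=
  ([[("option1", "A"), ("inventory_quantity", "2")], [("option1", "b"), ("inventory_quantity", "")]],
   [[("option1", "a"), ("inventory_quantity", " 2 ")], [("option1", "B")]])

def Spec_compare_inventory (shopify_variants : List (List (String × String))) (csv_variants : List (List (String × String))) (out : Bool) : Prop := out = compare_inventory_alt shopify_variants csv_variants
instance (shopify_variants : List (List (String × String))) (csv_variants : List (List (String × String))) (out : Bool) : Decidable (Spec_compare_inventory shopify_variants csv_variants out) := by unfold Spec_compare_inventory; infer_instance

-- ===== CLAIM (what is proved, stated in full; the proofs are below) =====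
def Claim_equal_compare_inventory : Prop := ∀ (shopify_variants : List (List (String × String))) (csv_variants : List (List (String × String))), Dom_compare_inventory shopify_variants csv_variants → Pre_compare_inventory shopify_variants csv_variants → Spec_compare_inventory shopify_variants csv_variants (compare_inventory shopify_variants csv_variants)

-- ===== LEMMAS AND PROOFS =====
theorem pv_insertBy_append {α : Type} (bef : α → α → Bool) (x : α) (as bs : List α)
    (h : ∀ a ∈ as, bef x a = false) :
    PySem.List.insertBy bef x (as ++ bs) = as ++ PySem.List.insertBy bef x bs := by
  induction as with
  | nil => rfl
  | cons a as ih =>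
      have ha : bef x a = false := h a (by simp)
      simp [PySem.List.insertBy, ha]
      exact ih (fun a ha' => h a (by simp [ha']))

theorem pv_insertBy_forall_before {α : Type} (bef : α → α → Bool) (x : α) (ys : List α)
    (h : ∀ y ∈ ys, bef x y = true) :
    PySem.List.insertBy bef x ys = x :: ys := by
  cases ys with
  | nil => rfl
  | cons y ys => simp [PySem.List.insertBy, h y (by simp)]

theorem pv_insertBy_cons {α : Type} (bef : α → α → Bool) (x y : α) (ys : List α) :
    PySem.List.insertBy bef x (y :: ys) =
      if bef x y then x :: y :: ys else y :: PySem.List.insertBy bef x ys := rfl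

theorem pv_L1 (x : List (String × String)) (ks : List String)
    (g : String → List (List (String × String)))
    (hks : ks.Pairwise (· < ·))
    (hmem : pvKey x ∈ ks)
    (hg : ∀ k, ∀ v ∈ g k, pvKey v = k) :
    PySem.List.insertBy (fun a b => decide (pvKey a < pvKey b)) x (ks.flatMap g) =
      ks.flatMap (fun k => g k ++ if pvKey x == k then [x] else []) := by
  induction ks with
  | nil => simp at hmem
  | cons k ks ih =>
      rcases List.pairwise_cons.mp hks with ⟨hlt, hks'⟩
      by_cases hk : pvKey x = k
      · have h1 : ∀ a ∈ g k, (fun a b => decide (pvKey a < pvKey b)) x a = false := by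
          intro a ha
          show decide (pvKey x < pvKey a) = false
          rw [hg k a ha, hk]
          exact decide_eq_false (lt_irrefl k)
        have h2 : ∀ y ∈ ks.flatMap g, (fun a b => decide (pvKey a < pvKey b)) x y = true := by
          intro y hy
          rcases List.mem_flatMap.mp hy with ⟨k', hk', hy'⟩
          show decide (pvKey x < pvKey y) = true
          rw [hg k' y hy', hk]
          exact decide_eq_true (hlt k' hk')
        have h3 : ks.flatMap (fun k' => g k' ++ if pvKey x == k' then [x] else []) =
            ks.flatMap g := by
          apply List.flatMap_congr
          intro k' hk'
          have hne : pvKey x ≠ k' := by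
            intro h; exact absurd (hlt k' hk') (by simp [← h, hk])
          simp [hne]
        rw [List.flatMap_cons, List.flatMap_cons,
          pv_insertBy_append _ _ _ _ h1, pv_insertBy_forall_before _ _ _ h2, h3]
        simp [hk]
      · have hmem' : pvKey x ∈ ks := by
          cases List.mem_cons.mp hmem with
          | inl h => exact absurd h hk
          | inr h => exact h
        have hklt : k < pvKey x := hlt _ hmem'
        have h1 : ∀ a ∈ g k, (fun a b => decide (pvKey a < pvKey b)) x a = false := by
          intro a ha
          show decide (pvKey x < pvKey a) = false
          rw [hg k a ha]
          exact decide_eq_false (not_lt.mpr hklt.le)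
        rw [List.flatMap_cons, List.flatMap_cons,
          pv_insertBy_append _ _ _ _ h1, ih hks' hmem']
        simp [hk]

theorem pv_L2 (x : List (String × String)) (ks : List String)
    (g : String → List (List (String × String)))
    (hks : ks.Pairwise (· < ·))
    (hmem : pvKey x ∉ ks)
    (hg : ∀ k, ∀ v ∈ g k, pvKey v = k)
    (hnil : g (pvKey x) = []) :
    PySem.List.insertBy (fun a b => decide (pvKey a < pvKey b)) x (ks.flatMap g) =
      (PySem.List.insertBy (fun a b => decide (a < b)) (pvKey x) ks).flatMap
        (fun k => g k ++ if pvKey x == k then [x] else []) := by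
  induction ks with
  | nil => simp [PySem.List.insertBy, hnil]
  | cons k ks ih =>
      rcases List.pairwise_cons.mp hks with ⟨hlt, hks'⟩
      have hxk : pvKey x ≠ k := fun h => hmem (by simp [h])
      by_cases h : pvKey x < k
      · have h2 : ∀ y ∈ (k :: ks).flatMap g, (fun a b => decide (pvKey a < pvKey b)) x y = true := by
          intro y hy
          rcases List.mem_flatMap.mp hy with ⟨k', hk', hy'⟩
          have hle : k ≤ k' := by
            cases List.mem_cons.mp hk' with
            | inl hh => exact le_of_eq hh.symm
            | inr hh => exact le_of_lt (hlt k' hh)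
          show decide (pvKey x < pvKey y) = true
          rw [hg k' y hy']
          exact decide_eq_true (lt_of_lt_of_le h hle)
        have h3 : (k :: ks).flatMap (fun k' => g k' ++ if pvKey x == k' then [x] else []) =
            (k :: ks).flatMap g := by
          apply List.flatMap_congr
          intro k' hk'
          have hne : pvKey x ≠ k' := fun hh => hmem (hh ▸ hk')
          simp [hne]
        rw [pv_insertBy_forall_before _ _ _ h2, pv_insertBy_cons, decide_eq_true h]
        have h4 : List.flatMap (fun k' => g k' ++ if (pvKey x == k') = true then [x] else [])
            (pvKey x :: k :: ks) = (g (pvKey x) ++ [x]) ++ List.flatMap g (k :: ks) := by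
          rw [List.flatMap_cons, h3]
          simp
        rw [if_pos rfl, h4]
        simp [hnil, List.flatMap_cons]
      · have hklt : k < pvKey x := lt_of_le_of_ne (not_lt.mp h) (fun hh => hxk hh.symm)
        have h1 : ∀ a ∈ g k, (fun a b => decide (pvKey a < pvKey b)) x a = false := by
          intro a ha
          show decide (pvKey x < pvKey a) = false
          rw [hg k a ha]
          exact decide_eq_false (not_lt.mpr hklt.le)
        have hmem' : pvKey x ∉ ks := fun hh => hmem (by simp [hh])
        rw [List.flatMap_cons, pv_insertBy_append _ _ _ _ h1, ih hks' hmem']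
        have hins : PySem.List.insertBy (fun a b => decide (a < b)) (pvKey x) (k :: ks) =
            k :: PySem.List.insertBy (fun a b => decide (a < b)) (pvKey x) ks := by
          rw [pv_insertBy_cons, decide_eq_false h]
          simp
        rw [hins, List.flatMap_cons]
        simp [hxk]

theorem pv_sorted_snoc {α κ : Type} [LT κ] [DecidableLT κ] (xs : List α) (x : α) (key : α → κ) :
    PySem.List.sorted (xs ++ [x]) key false =
      PySem.List.insertBy (fun a b => decide (key a < key b)) x (PySem.List.sorted xs key false) := by
  rw [PySem.List.sorted_eq_foldl_insertBy, PySem.List.sorted_eq_foldl_insertBy, List.foldl_append]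
  rfl

-- the stable sort by key is the concatenation, in sorted key order, of the key classes
theorem pv_main (xs : List (List (String × String))) :
    PySem.List.sorted xs pvKey false =
      (PySem.List.sorted (PySem.Set.ofList (xs.map pvKey)) (fun k => k) false).flatMap
        (fun k => xs.filter (fun v => pvKey v == k)) := by
  induction xs using List.reverseRecOn with
  | nil => rfl
  | append_singleton xs x ih =>
      have hg : ∀ k, ∀ v ∈ xs.filter (fun v => pvKey v == k), pvKey v = k := by
        intro k v hv
        have := List.of_mem_filter hv
        exact eq_of_beq this
      have hks : (PySem.List.sorted (PySem.Set.ofList (xs.map pvKey)) (fun k => k) false).Pairwise (· < ·) :=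
        PySem.List.sorted_ofList_pairwise_lt _
      have hsnoc : PySem.Set.ofList ((xs ++ [x]).map pvKey) =
          PySem.Set.add (PySem.Set.ofList (xs.map pvKey)) (pvKey x) := by
        rw [List.map_append, PySem.Set.ofList_eq_foldl, PySem.Set.ofList_eq_foldl, List.foldl_append]
        rfl
      have hfilter : ∀ k, (xs ++ [x]).filter (fun v => pvKey v == k) =
          xs.filter (fun v => pvKey v == k) ++ (if pvKey x == k then [x] else []) := by
        intro k
        rw [List.filter_append]
        by_cases h : pvKey x = k
        · simp [List.filter, h]
        · have hb : (pvKey x == k) = false := beq_eq_false_iff_ne.mpr h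
          simp [List.filter, hb]
      by_cases hc : (PySem.Set.ofList (xs.map pvKey)).contains (pvKey x) = true
      · have hadd : PySem.Set.add (PySem.Set.ofList (xs.map pvKey)) (pvKey x) =
            PySem.Set.ofList (xs.map pvKey) := by simp only [PySem.Set.add, hc, if_true]
        have hmem : pvKey x ∈ PySem.List.sorted (PySem.Set.ofList (xs.map pvKey)) (fun k => k) false := by
          rw [PySem.List.mem_sorted]
          simpa [PySem.Set.contains, List.contains_iff_mem] using hc
        rw [pv_sorted_snoc, ih, pv_L1 x _ _ hks hmem hg, hsnoc, hadd]
        apply List.flatMap_congr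
        intro k _
        rw [hfilter k]
      · have hadd : PySem.Set.add (PySem.Set.ofList (xs.map pvKey)) (pvKey x) =
            PySem.Set.ofList (xs.map pvKey) ++ [pvKey x] := by
          have hc' : (PySem.Set.ofList (xs.map pvKey)).contains (pvKey x) = false := by
            cases h : (PySem.Set.ofList (xs.map pvKey)).contains (pvKey x)
            · rfl
            · exact absurd h hc
          simp only [PySem.Set.add, hc']
          simp
        have hnotmem : pvKey x ∉ PySem.List.sorted (PySem.Set.ofList (xs.map pvKey)) (fun k => k) false := by
          rw [PySem.List.mem_sorted]
          intro hmem
          exact hc (by simpa [PySem.Set.contains, List.contains_iff_mem] using hmem)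
        have hnil : xs.filter (fun v => pvKey v == pvKey x) = [] := by
          rw [List.filter_eq_nil_iff]
          intro v hv hbeq
          apply hc
          have : pvKey x ∈ xs.map pvKey := by
            rw [List.mem_map]
            exact ⟨v, hv, eq_of_beq hbeq⟩
          have : pvKey x ∈ PySem.Set.ofList (xs.map pvKey) := (PySem.Set.mem_ofList _ _).mpr this
          simpa [PySem.Set.contains, List.contains_iff_mem] using this
        rw [pv_sorted_snoc, ih, pv_L2 x _ _ hks hnotmem hg hnil, hsnoc, hadd, pv_sorted_snoc]
        apply List.flatMap_congr
        intro k _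
        rw [hfilter k]

theorem pv_zip (ss cs : List (List (String × String))) (h : ss.length = cs.length) :
    pvLoopA (ss.zip cs) = decide (ss.map pvInv ≠ cs.map pvInv) := by
  induction ss generalizing cs with
  | nil => cases cs with
    | nil => simp [pvLoopA]
    | cons c cs => simp at h
  | cons s ss ih =>
      cases cs with
      | nil => simp at h
      | cons c cs =>
          have h' : ss.length = cs.length := by simpa using h
          rw [List.zip_cons_cons]
          by_cases hh : pvInv s = pvInv c
          · show (if pvInv s ≠ pvInv c then true else pvLoopA (ss.zip cs)) = _
            rw [if_neg (by simp [hh]), ih cs h']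
            simp [hh]
          · show (if pvInv s ≠ pvInv c then true else pvLoopA (ss.zip cs)) = _
            rw [if_pos hh]
            simp [hh]

-- B's grouping pass followed by the key-sorted concatenation computes the inventories
-- of the key classes in sorted key order
theorem pv_invSeq (xs : List (List (String × String))) :
    pvInvSeq xs =
      ((PySem.List.sorted (PySem.Set.ofList (xs.map pvKey)) (fun k => k) false).flatMap
        (fun k => xs.filter (fun v => pvKey v == k))).map pvInv := by
  have hfold : xs.foldl (fun d v => d.modify (pvKey v) [] (fun l => l ++ [pvInv v])) PySem.Dict.empty =
      (xs.map (fun v => (pvKey v, pvInv v))).foldl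
        (fun d p => d.modify p.1 [] (fun l => l ++ [p.2])) PySem.Dict.empty := by
    rw [List.foldl_map]
  have hkeys : (xs.foldl (fun d v => d.modify (pvKey v) [] (fun l => l ++ [pvInv v]))
      (PySem.Dict.empty : PySem.Dict String (List Int))).keys = PySem.Set.ofList (xs.map pvKey) := by
    rw [PySem.Dict.keys_foldl_modify_key xs pvKey [] (fun _ v => fun l => l ++ [pvInv v])]
    rw [PySem.Dict.keys_empty]
    rfl
  have hgetD : ∀ k, (xs.foldl (fun d v => d.modify (pvKey v) [] (fun l => l ++ [pvInv v]))
      (PySem.Dict.empty : PySem.Dict String (List Int))).getD k [] =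
      (xs.filter (fun v => pvKey v == k)).map pvInv := by
    intro k
    rw [hfold, PySem.Dict.getD_foldl_modify_append]
    rw [List.filter_map, List.map_map]
    rfl
  have hseq : pvInvSeq xs = (PySem.List.sorted
      (xs.foldl (fun d v => d.modify (pvKey v) [] (fun l => l ++ [pvInv v]))
        (PySem.Dict.empty : PySem.Dict String (List Int))).keys (fun k => k) false).foldl
      (fun out k => out ++ (xs.foldl (fun d v => d.modify (pvKey v) [] (fun l => l ++ [pvInv v]))
        PySem.Dict.empty).getD k []) [] := rfl
  rw [hseq, hkeys]
  rw [PySem.List.foldl_append_eq_flatMap (fun (k : String) =>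
    (xs.foldl (fun (d : PySem.Dict String (List Int)) (v : List (String × String)) =>
      d.modify (pvKey v) [] (fun l => l ++ [pvInv v])) PySem.Dict.empty).getD k [])]
  rw [List.map_flatMap]
  simp only [List.nil_append]
  apply List.flatMap_congr
  intro k _
  exact hgetD k

theorem pv_eq (s c : List (List (String × String))) :
    compare_inventory s c = compare_inventory_alt s c := by
  unfold compare_inventory compare_inventory_alt
  by_cases hl : s.length ≠ c.length
  · rw [if_pos hl, if_pos hl]
  · rw [if_neg hl, if_neg hl]
    have hlen : (PySem.List.sorted s pvKey false).length = (PySem.List.sorted c pvKey false).length := by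
      rw [(PySem.List.sorted_perm s pvKey false).length_eq, (PySem.List.sorted_perm c pvKey false).length_eq]
      exact not_not.mp (by simpa using hl)
    rw [pv_zip _ _ hlen, pv_main s, pv_main c, ← pv_invSeq s, ← pv_invSeq c]

-- ===== VERDICT (by name: the statement is the Claim_ definition above) =====
theorem compare_inventory_spec : Claim_equal_compare_inventory := by
  intro shopify_variants csv_variants _ _
  unfold Spec_compare_inventory
  exact pv_eq shopify_variants csv_variants
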